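-- pv_equiv track=rewrite | github.com/sehyunnoh/algo | Platform/codesignal/Intro/22.avoidObstacles/solution.py | solution
-- ===== SOURCE A (Python) =====
-- def solution(arr):
--   arr.sort()
--   for x in range(2, arr[-1]):
--     is_divided = False
--     for n in arr:
--       if n % x == 0:
--         is_divided = True
--         break
--     if not is_divided:
--       return x
--   return arr[-1]+1
-- ===== SOURCE B (Python) =====
-- def solution(arr):
--     m = max(arr)
--     if 0 in arr:
--         return m + 1
--     divs = set()
--     for n in arr:
--         n = abs(n)
--         d = 1
--         while d * d <= n:
--             if n % d == 0:
--                 divs.add(d)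
--                 divs.add(n // d)
--             d += 1
--     x = 2
--     while x < m:
--         if x not in divs:
--             return x
--         x += 1
--     return m + 1
-- ===== Notes on version B (the rewrite author's own statement) =====
-- stated objective: alternative
-- what changed: A sorts, then tests every candidate x against every array element until one x divides nothing; B never sorts: it enumerates each element's divisors once by trial division up to sqrt(|n|) into a hash set, then returns the first x >= 2 missing from that set; B also does not mutate the input (A sorts it in place).
import Mathlib
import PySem

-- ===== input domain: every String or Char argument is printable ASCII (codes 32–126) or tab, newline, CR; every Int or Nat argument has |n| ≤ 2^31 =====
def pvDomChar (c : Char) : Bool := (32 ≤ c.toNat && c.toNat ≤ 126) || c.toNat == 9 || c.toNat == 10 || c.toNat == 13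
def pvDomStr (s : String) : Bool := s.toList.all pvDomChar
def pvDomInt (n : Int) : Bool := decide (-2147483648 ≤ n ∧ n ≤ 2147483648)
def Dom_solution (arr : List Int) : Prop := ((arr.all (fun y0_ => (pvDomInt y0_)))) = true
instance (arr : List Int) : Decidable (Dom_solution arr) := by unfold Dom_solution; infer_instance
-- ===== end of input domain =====

-- B replaces A's sort + per-candidate scan of all elements by collecting every element's
-- divisors once (trial division) into a set and scanning candidates by membership.
-- A sorts `arr` in place (observable mutation); B does not. The equivalence proved here
-- is about the RETURN value only.


-- ===== PORT A =====
-- the `for x in range(2, arr[-1])` loop: return the first x no element is divisible by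
def solutionLoopA (s : List Int) (last : Int) (x : Int) : Int :=
  if x < last then
    if s.any (fun n => PySem.Int.mod n x == 0) then solutionLoopA s last (x + 1) else x
  else last + 1
termination_by (last - x).toNat
decreasing_by omega

def solution (arr : List Int) : Int :=
  let s := PySem.List.sorted arr (fun y => y) false
  match PySem.List.pyGet? s (-1) with
  | none => 0   -- IndexError on empty arr: excluded by Pre_solution
  | some last => solutionLoopA s last 2

-- ===== PORT B =====
-- the `while d * d <= n` divisor-collecting loop; the `1 ≤ d` test only makes the
-- recursion total (every call site starts at d = 1, as Python does)
def addDivisors (n : Int) (divs : PySem.Set Int) (d : Int) : PySem.Set Int :=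
  if h : 1 ≤ d ∧ d * d ≤ n then
    if PySem.Int.mod n d == 0 then
      addDivisors n (PySem.Set.add (PySem.Set.add divs d) (PySem.Int.floordiv n d)) (d + 1)
    else addDivisors n divs (d + 1)
  else divs
termination_by (n + 1 - d).toNat
decreasing_by
  all_goals
    have hdd : d ≤ d * d := le_mul_of_one_le_left (by omega) h.1
    omega

-- the `while x < m` loop: return the first x that is nobody's divisor
def solutionLoopB (divs : PySem.Set Int) (m x : Int) : Int :=
  if x < m then
    if PySem.Set.contains divs x then solutionLoopB divs m (x + 1) else x
  else m + 1
termination_by (m - x).toNat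
decreasing_by omega

def solution_alt (arr : List Int) : Int :=
  match PySem.List.max? arr (fun y => y) with
  | none => 0   -- ValueError on empty arr: excluded by Pre_solution
  | some m =>
    if arr.contains 0 then m + 1
    else
      let divs := arr.foldl (fun s n => addDivisors |n| s 1) PySem.Set.empty
      solutionLoopB divs m 2

-- ===== PRECONDITION & SPEC =====
-- A raises IndexError on the empty list (arr[-1]); excluded.
def Pre_solution (arr : List Int) : Prop := arr ≠ []
instance (arr : List Int) : Decidable (Pre_solution arr) := by unfold Pre_solution; infer_instance
def pvWitness_solution : List Int := [2, 3, 5]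

def Spec_solution (arr : List Int) (out : Int) : Prop := out = solution_alt arr
instance (arr : List Int) (out : Int) : Decidable (Spec_solution arr out) := by unfold Spec_solution; infer_instance

-- ===== CLAIM (what is proved, stated in full; the proofs are below) =====
def Claim_equal_solution : Prop := ∀ (arr : List Int), Dom_solution arr → Pre_solution arr → Spec_solution arr (solution arr)

-- ===== LEMMAS AND PROOFS =====

-- the last element of the sorted list is Python's max(arr)
theorem sorted_last_eq_max (arr : List Int) (h : arr ≠ []) :
    PySem.List.pyGet? (PySem.List.sorted arr (fun y => y) false) (-1) =
      PySem.List.max? arr (fun y => y) := by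
  have hperm := PySem.List.sorted_perm arr (fun y => y) false
  have hsne : PySem.List.sorted arr (fun y => y) false ≠ [] := by
    intro h0
    exact h (h0 ▸ hperm).symm.eq_nil
  obtain ⟨m, hm⟩ : ∃ m, PySem.List.max? arr (fun y => y) = some m := by
    cases hmx : PySem.List.max? arr (fun y => y) with
    | none => exact absurd ((PySem.List.max?_eq_none_iff arr _).1 hmx) h
    | some m => exact ⟨m, rfl⟩
  rw [PySem.List.pyGet?_neg_one, List.getLast?_eq_some_getLast hsne, hm, Option.some.injEq]
  have hpos : 0 < (PySem.List.sorted arr (fun y => y) false).length :=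
    List.length_pos_of_ne_nil hsne
  have hgmem : (PySem.List.sorted arr (fun y => y) false).getLast hsne ∈ arr :=
    (hperm.mem_iff).1 (List.getLast_mem hsne)
  have hge : ∀ y ∈ PySem.List.sorted arr (fun y => y) false,
      y ≤ (PySem.List.sorted arr (fun y => y) false).getLast hsne := by
    intro y hy
    obtain ⟨i, hi, hyi⟩ := List.getElem_of_mem hy
    rw [List.getLast_eq_getElem, ← hyi]
    exact PySem.List.sorted_id_getElem_mono arr (by omega) (by omega)
  exact le_antisymm (PySem.List.max?_isMax hm _ hgmem)
    (hge m ((hperm.mem_iff).2 (PySem.List.max?_mem hm)))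

-- what the trial-division loop collects from d upward
theorem mem_addDivisors (n : Int) (s : PySem.Set Int) (d : Int) (hd : 1 ≤ d) (x : Int) :
    x ∈ addDivisors n s d ↔
      x ∈ s ∨ ∃ e, d ≤ e ∧ e * e ≤ n ∧ e ∣ n ∧ (x = e ∨ x = PySem.Int.floordiv n e) := by
  rw [addDivisors]
  by_cases hdn : d * d ≤ n
  · rw [dif_pos ⟨hd, hdn⟩]
    have hcond : (PySem.Int.mod n d == 0) = true ↔ d ∣ n := by
      simp [PySem.Int.mod_eq_zero_iff_dvd]
    by_cases hdvd : d ∣ n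
    · rw [if_pos (hcond.2 hdvd), mem_addDivisors n _ (d + 1) (by omega) x]
      simp only [PySem.Set.mem_add]
      constructor
      · rintro (((hs | h) | h) | ⟨e, h1, h2, h3, h4⟩)
        · exact Or.inl hs
        · exact Or.inr ⟨d, le_refl d, hdn, hdvd, Or.inl h⟩
        · exact Or.inr ⟨d, le_refl d, hdn, hdvd, Or.inr h⟩
        · exact Or.inr ⟨e, by omega, h2, h3, h4⟩
      · rintro (hs | ⟨e, h1, h2, h3, h4⟩)
        · exact Or.inl (Or.inl (Or.inl hs))
        · by_cases hed : e = d
          · subst hed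
            rcases h4 with h4 | h4
            · exact Or.inl (Or.inl (Or.inr h4))
            · exact Or.inl (Or.inr h4)
          · exact Or.inr ⟨e, by omega, h2, h3, h4⟩
    · rw [if_neg (fun hb => hdvd (hcond.1 hb)), mem_addDivisors n s (d + 1) (by omega) x]
      constructor
      · rintro (hs | ⟨e, h1, h2, h3, h4⟩)
        · exact Or.inl hs
        · exact Or.inr ⟨e, by omega, h2, h3, h4⟩
      · rintro (hs | ⟨e, h1, h2, h3, h4⟩)
        · exact Or.inl hs
        · have hed : e ≠ d := fun hh => hdvd (hh ▸ h3)
          exact Or.inr ⟨e, by omega, h2, h3, h4⟩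
  · rw [dif_neg (fun hh => hdn hh.2)]
    constructor
    · exact Or.inl
    · rintro (hs | ⟨e, h1, h2, h3, h4⟩)
      · exact hs
      · exfalso
        have : d * d ≤ e * e := mul_le_mul h1 h1 (by omega) (by omega)
        omega
termination_by (n + 1 - d).toNat
decreasing_by
  all_goals
    have hdd : d ≤ d * d := le_mul_of_one_le_left (by omega) hd
    omega

-- a positive x divides n > 0 iff trial division up to √n finds it, as d or as n // d
theorem divisor_pair (n x : Int) (hn : 0 < n) :
    (∃ e, 1 ≤ e ∧ e * e ≤ n ∧ e ∣ n ∧ (x = e ∨ x = PySem.Int.floordiv n e)) ↔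
      (1 ≤ x ∧ x ∣ n) := by
  constructor
  · rintro ⟨e, he1, hee, ⟨c, hc⟩, hx⟩
    have hc1 : 1 ≤ c := by nlinarith
    have hfd : PySem.Int.floordiv n e = c := by
      rw [PySem.Int.floordiv_eq_ediv_of_pos (by omega), hc,
        Int.mul_ediv_cancel_left c (by omega)]
    rcases hx with rfl | rfl
    · exact ⟨he1, ⟨c, hc⟩⟩
    · rw [hfd]
      exact ⟨hc1, ⟨e, by rw [hc]; ring⟩⟩
  · rintro ⟨hx1, ⟨c, hc⟩⟩
    have hc1 : 1 ≤ c := by nlinarith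
    by_cases hxx : x * x ≤ n
    · exact ⟨x, hx1, hxx, ⟨c, hc⟩, Or.inl rfl⟩
    · refine ⟨c, hc1, ?_, ⟨x, by rw [hc]; ring⟩, Or.inr ?_⟩
      · nlinarith
      · rw [PySem.Int.floordiv_eq_ediv_of_pos (by omega), hc, mul_comm,
          Int.mul_ediv_cancel_left x (by omega)]
-- what the whole fold over the array collects: all positive divisors of the |elements|
theorem mem_fold_divs (arr : List Int) (x : Int) :
    ∀ s0 : PySem.Set Int, (0 : Int) ∉ arr →
      (x ∈ arr.foldl (fun s n => addDivisors |n| s 1) s0 ↔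
        x ∈ s0 ∨ ∃ n ∈ arr, 1 ≤ x ∧ x ∣ n) := by
  induction arr with
  | nil => simp
  | cons a t ih =>
      intro s0 hz
      have ha : (0 : Int) < |a| := abs_pos.2 (fun h0 => hz (by simp [h0]))
      rw [List.foldl_cons, ih _ (fun h => hz (List.mem_cons_of_mem _ h)),
        mem_addDivisors |a| s0 1 (le_refl 1) x, divisor_pair |a| x ha]
      constructor
      · rintro ((hs | ⟨h1, h2⟩) | ⟨n, hn, h⟩)
        · exact Or.inl hs
        · exact Or.inr ⟨a, List.mem_cons_self, h1, (dvd_abs x a).1 h2⟩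
        · exact Or.inr ⟨n, List.mem_cons_of_mem _ hn, h⟩
      · rintro (hs | ⟨n, hn, h1, h2⟩)
        · exact Or.inl (Or.inl hs)
        · rcases List.mem_cons.1 hn with rfl | hn
          · exact Or.inl (Or.inr ⟨h1, (dvd_abs x n).2 h2⟩)
          · exact Or.inr ⟨n, hn, h1, h2⟩

-- per-candidate x: "some element is divisible by x" = "x is in the divisor set"
theorem pred_eq (arr : List Int) (x : Int) (hz : (0 : Int) ∉ arr) (hx : 2 ≤ x) :
    ((PySem.List.sorted arr (fun y => y) false).any (fun n => PySem.Int.mod n x == 0)) =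
      PySem.Set.contains (arr.foldl (fun s n => addDivisors |n| s 1) PySem.Set.empty) x := by
  rw [(PySem.List.sorted_perm arr (fun y => y) false).any_eq]
  rw [Bool.eq_iff_iff, List.any_eq_true]
  rw [show (PySem.Set.contains (arr.foldl (fun s n => addDivisors |n| s 1) PySem.Set.empty) x
      = true) ↔ x ∈ arr.foldl (fun s n => addDivisors |n| s 1) PySem.Set.empty from
    PySem.Set.contains_iff _ _]
  rw [mem_fold_divs arr x PySem.Set.empty hz]
  constructor
  · rintro ⟨n, hn, hmod⟩
    have hdvd : x ∣ n := (PySem.Int.mod_eq_zero_iff_dvd n x).1 (by simpa using hmod)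
    exact Or.inr ⟨n, hn, by omega, hdvd⟩
  · rintro (hs | ⟨n, hn, _, h2⟩)
    · exact absurd hs (by simp [PySem.Set.empty])
    · exact ⟨n, hn, by simpa using (PySem.Int.mod_eq_zero_iff_dvd n x).2 h2⟩

-- the two loops agree when the per-candidate predicates agree
theorem loopAB (s : List Int) (divs : PySem.Set Int) (m : Int)
    (hpred : ∀ y, 2 ≤ y →
      (s.any (fun n => PySem.Int.mod n y == 0)) = PySem.Set.contains divs y)
    (x : Int) (hx : 2 ≤ x) :
    solutionLoopA s m x = solutionLoopB divs m x := by
  rw [solutionLoopA, solutionLoopB]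
  split
  · rw [← hpred x hx]
    split
    · exact loopAB s divs m hpred (x + 1) (by omega)
    · rfl
  · rfl
termination_by (m - x).toNat
decreasing_by omega

-- with 0 in the array, every candidate is "divided": A's loop runs through
theorem loopA_all (s : List Int) (m : Int) (hs : (0 : Int) ∈ s) (x : Int) :
    solutionLoopA s m x = m + 1 := by
  rw [solutionLoopA]
  split
  · have hd : s.any (fun n => PySem.Int.mod n x == 0) = true :=
      List.any_eq_true.2 ⟨0, hs, by simpa using (PySem.Int.mod_eq_zero_iff_dvd 0 x).2 (dvd_zero x)⟩
    rw [if_pos hd]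
    exact loopA_all s m hs (x + 1)
  · rfl
termination_by (m - x).toNat
decreasing_by omega

-- ===== VERDICT =====
theorem solution_spec : Claim_equal_solution := by
  intro arr _ hpre
  unfold Spec_solution solution solution_alt
  dsimp only
  obtain ⟨m, hm⟩ : ∃ m, PySem.List.max? arr (fun y => y) = some m := by
    cases hmx : PySem.List.max? arr (fun y => y) with
    | none => exact absurd ((PySem.List.max?_eq_none_iff arr _).1 hmx) hpre
    | some m => exact ⟨m, rfl⟩
  rw [sorted_last_eq_max arr hpre, hm]
  by_cases hz : (0 : Int) ∈ arr
  · have hc : arr.contains 0 = true := by simpa using hz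
    simp only [hc, if_true]
    exact loopA_all _ m (by simpa [PySem.List.mem_sorted] using hz) 2
  · have hc : arr.contains 0 = false := by simpa using hz
    simp only [hc, Bool.false_eq_true, if_false]
    exact loopAB _ _ m (fun y hy => pred_eq arr y hz hy) 2 (by omega)
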